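-- pv_equiv track=rewrite | github.com/aleattene/python_challenges | difficulty-level-5kyu/subarrays-with-an-odd-number-of-odd-numbers/solution.py | solve
-- ===== SOURCE A (Python) =====
-- def solve(arr):
--     # Count of odd sequences
--     count_odd_sequences = 0
--     # Sequence management (even = 0, odd = 1)
--     even_odd_sequence = 0
--     # Number of occurrences of the even or odd sequences
--     num_even_odd_sequences = [1, 0]
--     for number in arr:
--         # Check if the new contiguous sequence is even (% 2 = 0) or odd (% 2 = 1)
--         even_odd_sequence += number
--         even_odd_sequence %= 2
--         # Update the number of occurrences of the odd sequences
--         count_odd_sequences += num_even_odd_sequences[(even_odd_sequence + 1) % 2]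
--         # Update the number of occurrences of the all sequences (even or odd)
--         num_even_odd_sequences[even_odd_sequence] += 1
--     # Return the number of the odd sequences
--     return count_odd_sequences
-- ===== SOURCE B (Python) =====
-- def solve(arr):
--     # One pass: track parity of the running sum and count prefixes with
--     # even (e, seeded 1 for the empty prefix) and odd (o) parity.
--     # Answer is the closed-form product e * o.
--     parity = 0
--     e, o = 1, 0
--     for number in arr:
--         parity = (parity + number) % 2
--         if parity:
--             o += 1
--         else:
--             e += 1
--     return e * o
-- ===== Notes on version B (the rewrite author's own statement) =====
-- stated objective: simpler
-- what changed: Instead of accumulating cross-terms from a mutable two-slot counter list inside the loop, B only counts even/odd prefix parities in two scalars and returns the single closed-form product e*o after the loop.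
import Mathlib
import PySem

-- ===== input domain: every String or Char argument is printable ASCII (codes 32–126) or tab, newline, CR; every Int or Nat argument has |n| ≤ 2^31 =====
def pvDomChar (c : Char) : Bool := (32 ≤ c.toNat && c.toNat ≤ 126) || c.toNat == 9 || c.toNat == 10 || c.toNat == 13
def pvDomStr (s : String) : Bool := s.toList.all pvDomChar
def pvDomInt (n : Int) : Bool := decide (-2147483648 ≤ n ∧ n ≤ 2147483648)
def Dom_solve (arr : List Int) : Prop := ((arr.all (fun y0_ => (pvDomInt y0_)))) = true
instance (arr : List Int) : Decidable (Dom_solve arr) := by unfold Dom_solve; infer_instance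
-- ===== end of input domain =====

-- B replaces A's in-loop cross-term accumulation from a mutable counter list by two
-- scalar parity counters and the single closed-form product e*o after the loop (simpler).


-- ===== PORT A =====
-- loop state: count, parity s, and the two-slot counter list num (= num_even_odd_sequences).
-- The indices (s'+1)%2 and s' are always 0 or 1 into a length-2 list, so Python indexing
-- never raises; pyGetD / List.set are exact here.
def solveLoop (arr : List Int) (count s : Int) (num : List Int) : Int :=
  match arr with
  | [] => count
  | x :: rest =>
    let s' := PySem.Int.mod (s + x) 2
    let count' := count + PySem.List.pyGetD num (PySem.Int.mod (s' + 1) 2) 0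
    let num' := num.set s'.toNat (PySem.List.pyGetD num s' 0 + 1)
    solveLoop rest count' s' num'

def solve (arr : List Int) : Int := solveLoop arr 0 0 [1, 0]

-- ===== PORT B =====
-- loop state: parity p and the two prefix-parity counters e, o
def solveAltLoop (arr : List Int) (p e o : Int) : Int × Int × Int :=
  match arr with
  | [] => (p, e, o)
  | x :: rest =>
    let p' := PySem.Int.mod (p + x) 2
    if p' ≠ 0 then solveAltLoop rest p' e (o + 1)
    else solveAltLoop rest p' (e + 1) o

def solve_alt (arr : List Int) : Int :=
  let t := solveAltLoop arr 0 1 0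
  t.2.1 * t.2.2

-- ===== PRECONDITION & SPEC =====
def Spec_solve (arr : List Int) (out : Int) : Prop := out = solve_alt arr
instance (arr : List Int) (out : Int) : Decidable (Spec_solve arr out) := by unfold Spec_solve; infer_instance

-- ===== CLAIM (what is proved, stated in full; the proofs are below) =====
def Claim_equal_solve : Prop := ∀ (arr : List Int), Dom_solve arr → Spec_solve arr (solve arr)

-- ===== LEMMAS AND PROOFS =====

-- Invariant: from the same parity s ∈ {0,1}, A's loop from count c and counters [e,o]
-- returns c plus the change in the product e*o along B's loop.
theorem solveLoop_eq (arr : List Int) : ∀ (c s e o : Int), s = 0 ∨ s = 1 →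
    solveLoop arr c s [e, o] =
      c + (solveAltLoop arr s e o).2.1 * (solveAltLoop arr s e o).2.2 - e * o := by
  induction arr with
  | nil => intro c s e o _; simp [solveLoop, solveAltLoop]
  | cons x rest ih =>
    intro c s e o _
    have h0 : (0:Int) < 2 := by norm_num
    have hs' : PySem.Int.mod (s + x) 2 = 0 ∨ PySem.Int.mod (s + x) 2 = 1 := by
      have := PySem.Int.mod_nonneg (s + x) h0
      have := PySem.Int.mod_lt (s + x) h0
      omega
    rcases hs' with h | h
    · have := ih (c + o) 0 (e + 1) o (Or.inl rfl)
      simp only [solveLoop, solveAltLoop, h]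
      simp [PySem.List.pyGetD, PySem.List.pyGet?, PySem.List.pyIdx?, this]
      ring
    · have := ih (c + e) 1 e (o + 1) (Or.inr rfl)
      simp only [solveLoop, solveAltLoop, h]
      simp [PySem.List.pyGetD, PySem.List.pyGet?, PySem.List.pyIdx?, this]
      ring

-- ===== VERDICT (by name: the statement is the Claim_ definition above) =====
theorem solve_spec : Claim_equal_solve := by
  intro arr _
  unfold Spec_solve solve solve_alt
  have := solveLoop_eq arr 0 0 1 0 (Or.inl rfl)
  simpa using this
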